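-- pv_equiv track=rewrite | github.com/maewnarm/pe-energy-oee | fastapi-app/app/helpers.py | convert_array_to_dict_by_composite_columns
-- ===== SOURCE A (Python) =====
-- from typing import Any, List, Dict
--
-- def convert_array_to_dict_by_composite_columns(input: List, columns: List) -> Dict[Any, Dict]:
--     # this function convert array of dictionary to the dictionary by the value
--     #   in the specific columns
--     # the output dictionary will have a key as the tuple of value in the input columns list
--     # for example, if the input columns is ['id', 'name], so the return dictionary will have
--     #   the value of 'id' and 'name' (as tuple) is a key and remaining key:value pair will be value
--     #   input = [{'id':1, 'name':'tom', 'age':30}, {'id':2, 'name':'jerry', 'age':25}]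
--     #   column = ['id', 'name']
--     #   return {(1, 'tom'): {'age':30}, (2, 'jerry'): {'age':25'}}
--
--     # define output dictionary
--     output = {}
--
--     # for each dict in the input list
--     for e in input:
--
--         # check that all column in input columns list
--         #   are in the dictionary, otherwise skip
--         for column in columns:
--             if column not in e:
--                 return
--
--         # define value dictionary
--         e_output = {}
--
--         # create a list to keep key value
--         key_value_list = [None for _ in range(len(columns))]
--
--         # for each key and value pairs
--         for k, v in e.items():
--
--             # if the key is not in the columns list which we will make it as a key
--             #   of the output dictionary, keep this key-value in the value dictionary
--             if k not in columns:
--                 e_output = {**e_output, k: v}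
--             else:
--             # otherwise, set value in the key value list
--                 idx = columns.index(k)
--                 key_value_list[idx] = v
--
--         # set key (as tuple) and value dict to the output dictionary
--         output = {**output, tuple(key_value_list): e_output}
--     return output
-- ===== SOURCE B (Python) =====
-- def convert_array_to_dict_by_composite_columns(input, columns):
--     # Build each output key directly by indexing the row dict in column order,
--     # and each value dict with a single filtering comprehension; insert
--     # incrementally into output instead of rebuilding dicts.
--     colset = set(columns)
--     output = {}
--     for e in input:
--         try:
--             key = tuple(e[c] for c in columns)
--         except KeyError:
--             return
--         output[key] = {k: v for k, v in e.items() if k not in colset}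
--     return output
-- ===== Notes on version B (the rewrite author's own statement) =====
-- stated objective: alternative
-- what changed: B builds each composite key by direct dict lookup in column order and the value dict by one filtering comprehension against a precomputed column set, inserting into the output dict incrementally, instead of A's per-item list.index placement and {**dict, k: v} rebuilds of both the row dict and the whole output dict.
-- outside the precondition, e.g. on convert_array_to_dict_by_composite_columns([{'id': 1}], ['id', 'id']): A returns {(1, None): {}}, B returns {(1, 1): {}}
import Mathlib
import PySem

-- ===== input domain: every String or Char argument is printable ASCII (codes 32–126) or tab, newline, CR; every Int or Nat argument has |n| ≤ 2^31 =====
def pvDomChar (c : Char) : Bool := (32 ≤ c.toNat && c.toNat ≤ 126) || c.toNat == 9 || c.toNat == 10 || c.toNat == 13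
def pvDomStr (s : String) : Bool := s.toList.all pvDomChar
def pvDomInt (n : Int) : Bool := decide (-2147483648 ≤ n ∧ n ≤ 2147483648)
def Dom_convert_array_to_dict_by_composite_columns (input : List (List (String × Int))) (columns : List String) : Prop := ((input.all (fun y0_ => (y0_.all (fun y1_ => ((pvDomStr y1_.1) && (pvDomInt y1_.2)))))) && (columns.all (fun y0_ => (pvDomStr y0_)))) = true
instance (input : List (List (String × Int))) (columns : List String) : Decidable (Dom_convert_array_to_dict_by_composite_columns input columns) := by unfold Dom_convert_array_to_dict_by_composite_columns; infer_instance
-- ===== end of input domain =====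

-- B builds each composite key by direct lookup in column order and the value dict by one
-- filtering pass against a precomputed column set, inserting into the output incrementally,
-- instead of A's per-item list.index placement and {**d, k: v} dict rebuilds (objective: alternative).

-- ===== PORT A =====
-- one step of A's `for k, v in e.items()` loop: state = (key_value_list, e_output)
def pvA_rowStep (columns : List String) (st : List (Option Int) × PySem.Dict String Int)
    (kv : String × Int) : List (Option Int) × PySem.Dict String Int :=
  if ¬ (columns.contains kv.1) then
    (st.1, st.2.insert kv.1 kv.2)          -- e_output = {**e_output, k: v}
  else
    -- idx = columns.index(k); key_value_list[idx] = v  (index? is some here since k ∈ columns)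
    (st.1.set ((PySem.List.index? columns kv.1).getD 0) (some kv.2), st.2)

-- tuple(key_value_list): a slot is still None only when columns has duplicates (outside Pre_);
-- 0 stands in for Python's None there
def pvA_row (columns : List String) (e : List (String × Int)) :
    List Int × List (String × Int) :=
  (((PySem.Dict.ofList e).items.foldl (pvA_rowStep columns)
      (List.replicate columns.length none, PySem.Dict.empty)).1.map (fun o => o.getD 0),
   ((PySem.Dict.ofList e).items.foldl (pvA_rowStep columns)
      (List.replicate columns.length none, PySem.Dict.empty)).2.items)

def pvA_go (columns : List String) :
    List (List (String × Int)) → PySem.Dict (List Int) (List (String × Int)) →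
    List (List Int × List (String × Int))
  | [], output => output.items
  | e :: rest, output =>
      if columns.all (fun c => (PySem.Dict.ofList e).contains c) then
        pvA_go columns rest (output.insert (pvA_row columns e).1 (pvA_row columns e).2)
      else []   -- Python A returns None here (not a dict); such inputs are outside Pre_

def convert_array_to_dict_by_composite_columns (input : List (List (String × Int)))
    (columns : List String) : List (List Int × List (String × Int)) :=
  pvA_go columns input PySem.Dict.empty

-- ===== PORT B =====
-- key = tuple(e[c] for c in columns); none = KeyError
def pvB_key? (columns : List String) (e : List (String × Int)) : Option (List Int) :=
  columns.mapM (fun c => (PySem.Dict.ofList e).get? c)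

-- {k: v for k, v in e.items() if k not in colset}
def pvB_rest (colset : PySem.Set String) (e : List (String × Int)) : List (String × Int) :=
  ((PySem.Dict.ofList e).items.foldl
      (fun (d : PySem.Dict String Int) kv =>
        if colset.contains kv.1 then d else d.insert kv.1 kv.2)
      PySem.Dict.empty).items

def pvB_go (columns : List String) (colset : PySem.Set String) :
    List (List (String × Int)) → PySem.Dict (List Int) (List (String × Int)) →
    List (List Int × List (String × Int))
  | [], output => output.items
  | e :: rest, output =>
      match pvB_key? columns e with
      | none => []     -- except KeyError: return  (Python B returns None; outside Pre_)
      | some key => pvB_go columns colset rest (output.insert key (pvB_rest colset e))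

def convert_array_to_dict_by_composite_columns_alt (input : List (List (String × Int)))
    (columns : List String) : List (List Int × List (String × Int)) :=
  pvB_go columns (PySem.Set.ofList columns) input PySem.Dict.empty

-- ===== PRECONDITION & SPEC =====
-- Pre_ excludes (i) nonempty inputs with duplicate column names, where A returns a dict whose
-- key tuple contains None (not an Int, so outside the declared return type), and (ii) inputs
-- with a row missing some column, where A returns None instead of a dict.
def Pre_convert_array_to_dict_by_composite_columns (input : List (List (String × Int))) (columns : List String) : Prop :=
  (input = [] ∨ columns.Nodup) ∧
  ∀ e ∈ input, ∀ c ∈ columns, (PySem.Dict.ofList e).contains c = true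
instance (input : List (List (String × Int))) (columns : List String) : Decidable (Pre_convert_array_to_dict_by_composite_columns input columns) := by unfold Pre_convert_array_to_dict_by_composite_columns; infer_instance

def pvWitness_convert_array_to_dict_by_composite_columns : (List (List (String × Int))) × List String :=
  ([[("id", 1), ("age", 30)], [("id", 2), ("age", 25)]], ["id"])

def Spec_convert_array_to_dict_by_composite_columns (input : List (List (String × Int))) (columns : List String) (out : List (List Int × List (String × Int))) : Prop := out = convert_array_to_dict_by_composite_columns_alt input columns
instance (input : List (List (String × Int))) (columns : List String) (out : List (List Int × List (String × Int))) : Decidable (Spec_convert_array_to_dict_by_composite_columns input columns out) := by unfold Spec_convert_array_to_dict_by_composite_columns; infer_instance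

-- ===== CLAIM (what is proved, stated in full; the proofs are below) =====
def Claim_equal_convert_array_to_dict_by_composite_columns : Prop := ∀ (input : List (List (String × Int))) (columns : List String), Dom_convert_array_to_dict_by_composite_columns input columns → Pre_convert_array_to_dict_by_composite_columns input columns → Spec_convert_array_to_dict_by_composite_columns input columns (convert_array_to_dict_by_composite_columns input columns)

-- ===== LEMMAS AND PROOFS =====

-- the key_value_list component of A's per-row fold, on its own
def pvKeyStep (columns : List String) (kvl : List (Option Int)) (kv : String × Int) :
    List (Option Int) :=
  if ¬ (columns.contains kv.1) then kvl
  else kvl.set ((PySem.List.index? columns kv.1).getD 0) (some kv.2)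

theorem pv_fold_fst (columns : List String) (l : List (String × Int)) :
    ∀ kvl (d : PySem.Dict String Int), (l.foldl (pvA_rowStep columns) (kvl, d)).1 =
      l.foldl (pvKeyStep columns) kvl := by
  induction l with
  | nil => intro kvl d; rfl
  | cons kv rest ih =>
      intro kvl d
      simp only [List.foldl_cons, pvA_rowStep, pvKeyStep]
      by_cases h : columns.contains kv.1
      · rw [if_neg (not_not_intro h), if_neg (not_not_intro h)]; exact ih _ _
      · rw [if_pos h, if_pos h]; exact ih _ _

theorem pv_fold_snd (columns : List String) (l : List (String × Int)) :
    ∀ kvl (d : PySem.Dict String Int), (l.foldl (pvA_rowStep columns) (kvl, d)).2 =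
      l.foldl (fun (d : PySem.Dict String Int) (kv : String × Int) =>
        if ¬ (columns.contains kv.1) then d.insert kv.1 kv.2 else d) d := by
  induction l with
  | nil => intro kvl d; rfl
  | cons kv rest ih =>
      intro kvl d
      simp only [List.foldl_cons, pvA_rowStep]
      by_cases h : columns.contains kv.1
      · rw [if_neg (not_not_intro h), if_neg (not_not_intro h)]; exact ih _ _
      · rw [if_pos h, if_pos h]; exact ih _ _

theorem pv_set_contains_eq (columns : List String) (k : String) :
    (PySem.Set.ofList columns).contains k = columns.contains k := by
  unfold PySem.Set.contains
  rw [Bool.eq_iff_iff]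
  simp only [List.contains_iff_mem]
  exact ⟨fun h => (PySem.Set.mem_ofList columns k).1 h,
         fun h => (PySem.Set.mem_ofList columns k).2 h⟩

-- the value-dict folds of A and B agree
theorem pv_rest_eq (columns : List String) (e : List (String × Int)) :
    pvB_rest (PySem.Set.ofList columns) e = (pvA_row columns e).2 := by
  unfold pvB_rest pvA_row
  rw [pv_fold_snd]
  congr 1
  apply PySem.List.foldl_congr_mem
  intro d kv _
  rw [pv_set_contains_eq]
  by_cases h : columns.contains kv.1
  · rw [if_pos h, if_neg (not_not_intro h)]
  · rw [if_neg h, if_pos h]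

theorem pv_index?_getElem (columns : List String) (hc : columns.Nodup)
    (i : Nat) (hi : i < columns.length) :
    PySem.List.index? columns columns[i] = some i := by
  rw [PySem.List.index?_eq_idxOf?, List.idxOf?_eq_some_iff]
  exact ⟨hi, rfl, fun j hj h => absurd ((List.Nodup.getElem_inj_iff hc).1 h) (by omega)⟩

theorem pv_len_key_fold (columns : List String) (l : List (String × Int)) :
    ∀ kvl : List (Option Int), (l.foldl (pvKeyStep columns) kvl).length = kvl.length := by
  induction l with
  | nil => intro kvl; rfl
  | cons kv rest ih =>
      intro kvl
      rw [List.foldl_cons, ih]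
      unfold pvKeyStep; split <;> simp

-- characterisation of A's key_value_list fold when the row's keys are distinct
theorem pv_key_fold (columns : List String) (hc : columns.Nodup) (l : List (String × Int))
    (hnd : (l.map Prod.fst).Nodup) (i : Nat) (hi : i < columns.length) :
    ∀ kvl : List (Option Int), kvl.length = columns.length →
    (l.foldl (pvKeyStep columns) kvl)[i]? =
      match l.find? (fun kv => kv.1 == columns[i]) with
      | some kv => some (some kv.2)
      | none => kvl[i]? := by
  induction l with
  | nil => intro kvl _; simp
  | cons kv rest ih =>
      intro kvl hlen
      simp only [List.map_cons, List.nodup_cons] at hnd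
      rw [List.foldl_cons, ih hnd.2 _ (by unfold pvKeyStep; split <;> simp [hlen])]
      by_cases hk : kv.1 = columns[i]
      · have hfind : rest.find? (fun kv' => kv'.1 == columns[i]) = none := by
          rw [List.find?_eq_none]
          intro x hx hbeq
          exact hnd.1 (by rw [hk, ← eq_of_beq hbeq]; exact List.mem_map_of_mem hx)
        have hmem : columns.contains kv.1 = true := by
          rw [hk]; exact List.contains_iff_mem.mpr (columns.getElem_mem hi)
        rw [hfind]
        simp only [List.find?, show (kv.1 == columns[i]) = true by simp [hk]]
        unfold pvKeyStep
        rw [if_neg (not_not_intro hmem), hk, pv_index?_getElem columns hc i hi]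
        simp [hlen, hi]
      · simp only [List.find?, show (kv.1 == columns[i]) = false by simp [hk]]
        cases hf : rest.find? (fun kv' => kv'.1 == columns[i]) with
        | some v => simp
        | none =>
            simp only []
            unfold pvKeyStep
            by_cases h : columns.contains kv.1
            · rw [if_neg (not_not_intro h)]
              obtain ⟨j, hj, hje⟩ := List.getElem_of_mem (List.contains_iff_mem.mp h)
              have hidx := pv_index?_getElem columns hc j hj
              rw [hje] at hidx
              rw [hidx]
              have hji : j ≠ i := fun he => hk (by subst he; rw [← hje])
              simp [hji]
            · rw [if_pos h]

-- first match in d.items is exactly d.get? (keys of d distinct)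
theorem pv_find?_items_eq_get? (d : PySem.Dict String Int) (hnd : d.keys.Nodup) (c : String) :
    (d.items.find? (fun kv => kv.1 == c)).map (·.2) = d.get? c := by
  cases hf : d.items.find? (fun kv => kv.1 == c) with
  | some kv =>
      have hmem := List.mem_of_find?_eq_some hf
      have hc : kv.1 = c := by
        have := List.find?_some hf
        exact eq_of_beq (by simpa using this)
      have : d.get? kv.1 = some kv.2 :=
        PySem.Dict.get?_of_mem_items d (k := kv.1) (v := kv.2) (by simpa using hmem) hnd
      rw [← hc, this]; rfl
  | none =>
      rw [List.find?_eq_none] at hf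
      have : c ∉ d.keys := by
        simp only [PySem.Dict.keys]
        intro hc
        obtain ⟨kv, hkv, hkv1⟩ := List.mem_map.mp hc
        exact hf kv hkv (by simp [hkv1])
      rw [PySem.Dict.get?_eq_none_iff_not_mem_keys d c |>.mpr this]; rfl

theorem pv_mapM_eq_some (columns : List String) (f : String → Option Int)
    (h : ∀ c ∈ columns, (f c).isSome) :
    columns.mapM f = some (columns.map (fun c => (f c).getD 0)) := by
  induction columns with
  | nil => rfl
  | cons c rest ih =>
      obtain ⟨v, hv⟩ := Option.isSome_iff_exists.mp (h c List.mem_cons_self)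
      rw [List.mapM_cons, hv, ih (fun c hc => h c (List.mem_cons_of_mem _ hc))]
      simp [hv]

-- per-row agreement: B's composite key is exactly A's key_value_list
theorem pv_key_eq (columns : List String) (hc : columns.Nodup) (e : List (String × Int))
    (hall : ∀ c ∈ columns, (PySem.Dict.ofList e).contains c = true) :
    pvB_key? columns e = some (pvA_row columns e).1 := by
  have hnd : (PySem.Dict.ofList e).keys.Nodup := PySem.Dict.nodup_keys_ofList e
  have hndl : ((PySem.Dict.ofList e).items.map Prod.fst).Nodup := by
    simpa only [PySem.Dict.keys] using hnd
  have hsome : ∀ c ∈ columns, ((PySem.Dict.ofList e).get? c).isSome := by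
    intro c hcm
    have h := hall c hcm
    rw [PySem.Dict.contains_eq_isSome_get?] at h
    exact h
  unfold pvB_key? pvA_row
  rw [pv_mapM_eq_some _ _ hsome, pv_fold_fst]
  congr 1
  apply List.ext_getElem?
  intro i
  by_cases hi : i < columns.length
  · rw [List.getElem?_map, List.getElem?_map,
      pv_key_fold columns hc _ hndl i hi _ (by simp),
      List.getElem?_eq_getElem hi]
    have hck := hsome columns[i] (columns.getElem_mem hi)
    obtain ⟨v, hv⟩ := Option.isSome_iff_exists.mp hck
    have hfind := pv_find?_items_eq_get? (PySem.Dict.ofList e) hnd columns[i]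
    rw [hv] at hfind
    cases hf : (PySem.Dict.ofList e).items.find? (fun kv => kv.1 == columns[i]) with
    | none => rw [hf] at hfind; simp at hfind
    | some kv =>
        rw [hf] at hfind
        simp only [Option.map_some] at hfind
        simp [hfind, hv]
  · rw [List.getElem?_eq_none (by simp [Nat.le_of_not_lt hi]),
        List.getElem?_eq_none]
    rw [List.length_map, pv_len_key_fold]
    simpa using Nat.le_of_not_lt hi

theorem pv_go_eq (columns : List String) (hc : columns.Nodup)
    (input : List (List (String × Int)))
    (hall : ∀ e ∈ input, ∀ c ∈ columns, (PySem.Dict.ofList e).contains c = true) :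
    ∀ output, pvA_go columns input output =
      pvB_go columns (PySem.Set.ofList columns) input output := by
  induction input with
  | nil => intro output; rfl
  | cons e rest ih =>
      intro output
      have he : ∀ c ∈ columns, (PySem.Dict.ofList e).contains c = true :=
        hall e List.mem_cons_self
      rw [pvA_go, pvB_go, if_pos (List.all_eq_true.mpr fun c hcm =>
        he c (by simpa using hcm)), pv_key_eq columns hc e he, pv_rest_eq]
      exact ih (fun e' he' => hall e' (List.mem_cons_of_mem _ he')) _

-- ===== VERDICT (by name: the statement is the Claim_ definition above) =====
theorem convert_array_to_dict_by_composite_columns_spec :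
    Claim_equal_convert_array_to_dict_by_composite_columns := by
  intro input columns _ hpre
  unfold Spec_convert_array_to_dict_by_composite_columns
  unfold convert_array_to_dict_by_composite_columns
    convert_array_to_dict_by_composite_columns_alt
  rcases hpre.1 with hnil | hc
  · subst hnil; rfl
  · exact pv_go_eq columns hc input hpre.2 PySem.Dict.empty
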